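-- pv_equiv track=rewrite | github.com/Cruzade-ab/comp2900 | Actividades/04CombinaciónBigO/ejercicio01/app.py | ejercicio_1
-- ===== SOURCE A (Python) =====
-- def ejercicio_1(lista):
--     suma = 0
--     for num in lista:
--         suma += num
--         for i in lista:
--             for j in lista:
--                 suma += i * j
--     return suma
-- ===== SOURCE B (Python) =====
-- def ejercicio_1(lista):
--     s = sum(lista)
--     return s + len(lista) * s * s
-- ===== Notes on version B (the rewrite author's own statement) =====
-- stated objective: faster
-- what changed: Replaced the triple nested loop with a closed form: compute S = sum(lista) once and return S + len(lista)*S*S.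
import Mathlib
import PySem

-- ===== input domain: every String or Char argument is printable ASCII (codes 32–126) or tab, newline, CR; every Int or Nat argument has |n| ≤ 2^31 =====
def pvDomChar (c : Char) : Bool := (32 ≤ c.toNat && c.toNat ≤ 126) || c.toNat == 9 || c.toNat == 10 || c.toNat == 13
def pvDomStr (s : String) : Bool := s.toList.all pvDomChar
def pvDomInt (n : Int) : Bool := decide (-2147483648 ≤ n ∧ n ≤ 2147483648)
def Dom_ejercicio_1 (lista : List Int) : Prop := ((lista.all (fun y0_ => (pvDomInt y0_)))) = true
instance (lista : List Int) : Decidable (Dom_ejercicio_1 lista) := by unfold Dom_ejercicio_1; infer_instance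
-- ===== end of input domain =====

-- B replaces A's O(n^3) triple nested loop with the O(n) closed form S + n*S*S.

-- ===== PORT A =====
def ejercicio_1 (lista : List Int) : Int :=
  lista.foldl (fun suma num =>
    lista.foldl (fun s i =>
      lista.foldl (fun s' j => s' + i * j) s) (suma + num)) 0

-- ===== PORT B =====
def ejercicio_1_alt (lista : List Int) : Int :=
  let s := lista.foldl (· + ·) 0
  s + (lista.length : Int) * s * s

-- ===== PRECONDITION & SPEC =====
def Spec_ejercicio_1 (lista : List Int) (out : Int) : Prop := out = ejercicio_1_alt lista
instance (lista : List Int) (out : Int) : Decidable (Spec_ejercicio_1 lista out) := by unfold Spec_ejercicio_1; infer_instance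

-- ===== CLAIM (what is proved, stated in full; the proofs are below) =====
def Claim_equal_ejercicio_1 : Prop := ∀ (lista : List Int), Dom_ejercicio_1 lista → Spec_ejercicio_1 lista (ejercicio_1 lista)

-- ===== LEMMAS AND PROOFS =====

-- Shifting the accumulator of the running sum.
theorem pv_sum_shift (t : List Int) (s : Int) :
    t.foldl (· + ·) s = s + t.foldl (· + ·) 0 := by
  induction t generalizing s with
  | nil => simp
  | cons h t ih => simp only [List.foldl_cons]; rw [ih, ih (0 + h)]; ring

-- One pass of 'for x in lista: s += x*c' adds (sum lista)*c.
theorem pv_fold_mul (lista : List Int) (c s : Int) :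
    lista.foldl (fun a x => a + x * c) s = s + (lista.foldl (· + ·) 0) * c := by
  induction lista generalizing s with
  | nil => simp
  | cons h t ih =>
      simp only [List.foldl_cons]
      rw [ih, pv_sum_shift t (0 + h)]; ring

-- The middle loop adds S * S.
theorem pv_mid (lista : List Int) (s : Int) :
    lista.foldl (fun a i => lista.foldl (fun a' j => a' + i * j) a) s
      = s + (lista.foldl (· + ·) 0) * (lista.foldl (· + ·) 0) := by
  have h : (fun (a i : Int) => lista.foldl (fun a' j => a' + i * j) a)
      = fun a i => a + i * (lista.foldl (· + ·) 0) := by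
    funext a i
    rw [show (fun a' j => a' + i * j) = fun a' j => a' + j * i by funext a' j; ring,
        pv_fold_mul]; ring
  rw [h, show (fun (a i : Int) => a + i * (lista.foldl (· + ·) 0))
        = fun a i => a + i * (lista.foldl (· + ·) 0) from rfl,
      pv_fold_mul]

-- Outer loop: each iteration adds num + S*S.
theorem pv_outer (lista rest : List Int) (s : Int) :
    rest.foldl (fun suma num =>
        lista.foldl (fun a i => lista.foldl (fun a' j => a' + i * j) a) (suma + num)) s
      = s + rest.foldl (· + ·) 0
          + (rest.length : Int) * (lista.foldl (· + ·) 0) * (lista.foldl (· + ·) 0) := by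
  induction rest generalizing s with
  | nil => simp
  | cons h t ih =>
      simp only [List.foldl_cons, List.length_cons]
      rw [ih, pv_mid, pv_sum_shift t (0 + h)]
      push_cast; ring

-- ===== VERDICT (by name: the statement is the Claim_ definition above) =====
theorem ejercicio_1_spec : Claim_equal_ejercicio_1 := by
  intro lista _
  unfold Spec_ejercicio_1 ejercicio_1 ejercicio_1_alt
  rw [pv_outer]
  ring
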